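-- pv_equiv track=rewrite | github.com/netket/netket | Test/Graph/test_graph.py | coord2index
-- ===== SOURCE A (Python) =====
-- def coord2index(xs, length):
--     if isinstance(xs, int):
--         return xs
--     i = 0
--     scale = 1
--     for x in xs:
--         i += scale * x
--         scale *= length
--     return i
-- ===== SOURCE B (Python) =====
-- def coord2index(xs, length):
--     if isinstance(xs, int):
--         return xs
--     i = 0
--     for x in reversed(list(xs)):
--         i = i * length + x
--     return i
-- ===== Notes on version B (the rewrite author's own statement) =====
-- stated objective: idiomatic
-- what changed: Replaces the two-accumulator loop (running index plus explicit power-of-length scale) by Horner's rule over the coordinates in reverse order, keeping a single accumulator.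
import Mathlib
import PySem

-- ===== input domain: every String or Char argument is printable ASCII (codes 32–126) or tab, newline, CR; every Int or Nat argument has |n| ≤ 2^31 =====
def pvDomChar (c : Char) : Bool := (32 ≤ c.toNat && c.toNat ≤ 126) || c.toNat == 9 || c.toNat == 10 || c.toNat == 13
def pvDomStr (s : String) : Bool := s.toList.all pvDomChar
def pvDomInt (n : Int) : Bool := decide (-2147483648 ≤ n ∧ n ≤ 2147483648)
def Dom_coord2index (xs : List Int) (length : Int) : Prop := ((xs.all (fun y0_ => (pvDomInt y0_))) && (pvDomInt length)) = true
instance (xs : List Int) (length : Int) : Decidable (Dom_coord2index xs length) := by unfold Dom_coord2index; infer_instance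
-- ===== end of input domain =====

-- ===== PORT A =====
-- Port of A: foldl over xs carrying (i, scale).
def coord2index (xs : List Int) (length : Int) : Int :=
  (xs.foldl (fun (st : Int × Int) x => (st.1 + st.2 * x, st.2 * length)) (0, 1)).1

-- ===== PORT B =====
-- Port of B: Horner's rule over the reversed coordinate list, single accumulator.
def coord2index_alt (xs : List Int) (length : Int) : Int :=
  xs.reverse.foldl (fun i x => i * length + x) 0

-- ===== PRECONDITION & SPEC =====
def Spec_coord2index (xs : List Int) (length : Int) (out : Int) : Prop := out = coord2index_alt xs length
instance (xs : List Int) (length : Int) (out : Int) : Decidable (Spec_coord2index xs length out) := by unfold Spec_coord2index; infer_instance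

-- ===== CLAIM (what is proved, stated in full; the proofs are below) =====
def Claim_equal_coord2index : Prop := ∀ (xs : List Int) (length : Int), Dom_coord2index xs length → Spec_coord2index xs length (coord2index xs length)

-- ===== LEMMAS AND PROOFS =====

-- ===== VERDICT (by name: the statement is the Claim_ definition above) =====
-- Loop invariant for A's fold, against B's Horner value H xs = xs.reverse.foldl (· * length + ·) 0:
-- starting from state (i, s), A's fold returns i + s * H xs.
theorem foldA_eq (length : Int) : ∀ (xs : List Int) (i s : Int),
    (xs.foldl (fun (st : Int × Int) x => (st.1 + st.2 * x, st.2 * length)) (i, s)).1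
      = i + s * xs.reverse.foldl (fun i x => i * length + x) 0 := by
  intro xs
  induction xs with
  | nil => intro i s; simp
  | cons x xs ih =>
    intro i s
    simp only [List.foldl_cons, List.reverse_cons, List.foldl_append, List.foldl_nil, ih]
    ring

theorem coord2index_spec : Claim_equal_coord2index := by
  intro xs length _
  unfold Spec_coord2index coord2index coord2index_alt
  exact foldA_eq length xs 0 1 |>.trans (by ring)
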